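-- pv_equiv track=rewrite | github.com/Sumit-kj/PracticeProblems | src/Misc/array_pair.py | array_pair
-- ===== SOURCE A (Python) =====
-- def array_pair(arr, n):
--     """
--     This function gives the number of pair of elements of an array
--     :param n: length of array
--     :param arr: the array
--     :return: count of pairs
--     """
--     count = 0
--     i = 0
--     while i < n-1:
--         j = i + 1
--         max_a = arr[i]
--         while j < n:
--             if arr[j] > max_a:
--                 max_a = arr[j]
--             if arr[i] * arr[j] <= max_a:
--                 count += 1
--             j += 1
--         i += 1
--     return count
-- ===== SOURCE B (Python) =====
-- def array_pair(arr, n):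
--     """
--     This function gives the number of pair of elements of an array
--     :param n: length of array
--     :param arr: the array
--     :return: count of pairs
--     """
--     count = 0
--     for i in range(n - 1):
--         for j in range(i + 1, n):
--             if arr[i] * arr[j] <= max(arr[i:j + 1]):
--                 count += 1
--     return count
-- ===== Notes on version B (the rewrite author's own statement) =====
-- stated objective: simpler
-- what changed: Replaces the while-loops with the incrementally maintained running-max accumulator by for-loops over ranges that recompute the subarray maximum directly as max(arr[i:j+1]), eliminating the mutable max_a state.
import Mathlib
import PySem

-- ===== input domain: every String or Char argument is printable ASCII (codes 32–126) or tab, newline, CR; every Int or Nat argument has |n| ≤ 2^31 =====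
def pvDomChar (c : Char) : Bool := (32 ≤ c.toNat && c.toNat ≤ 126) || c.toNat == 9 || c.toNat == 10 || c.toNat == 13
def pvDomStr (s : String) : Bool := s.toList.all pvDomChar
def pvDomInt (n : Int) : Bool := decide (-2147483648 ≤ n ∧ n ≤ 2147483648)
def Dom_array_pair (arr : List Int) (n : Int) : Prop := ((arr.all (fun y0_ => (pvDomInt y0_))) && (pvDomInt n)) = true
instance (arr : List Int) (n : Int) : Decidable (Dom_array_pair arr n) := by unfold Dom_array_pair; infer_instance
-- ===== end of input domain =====

-- B replaces A's while-loops with running-max accumulator by range loops that recompute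
-- the subarray maximum as max(arr[i:j+1]); same count, no mutable max_a state (objective: simpler).

-- ===== PORT A =====
-- inner `while j < n` loop; state (j, max_a, count); `.getD 0` only marks the IndexError
-- case, unreachable under Pre_array_pair
def apInner (arr : List Int) (n ai : Int) (j maxa count : Int) : Int :=
  if _h : j < n then
    let aj := (PySem.List.pyGet? arr j).getD 0
    let maxa' := if aj > maxa then aj else maxa
    let count' := if ai * aj ≤ maxa' then count + 1 else count
    apInner arr n ai (j + 1) maxa' count'
  else count
termination_by (n - j).toNat
decreasing_by omega

-- outer `while i < n-1` loop
def apOuter (arr : List Int) (n : Int) (i count : Int) : Int :=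
  if _h : i < n - 1 then
    let ai := (PySem.List.pyGet? arr i).getD 0
    apOuter arr n (i + 1) (apInner arr n ai (i + 1) ai count)
  else count
termination_by (n - 1 - i).toNat
decreasing_by omega

def array_pair (arr : List Int) (n : Int) : Int := apOuter arr n 0 0

-- ===== PORT B =====
-- fold over range(n-1), inner fold over range(i+1, n); max(arr[i:j+1]) is
-- PySem.List.max? of the slice (`.getD 0` marks the empty-max ValueError, unreachable under Pre_)
def array_pair_alt (arr : List Int) (n : Int) : Int :=
  (PySem.List.pyRange 0 (n - 1) 1).foldl (fun count i =>
    (PySem.List.pyRange (i + 1) n 1).foldl (fun count j =>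
      if (PySem.List.pyGet? arr i).getD 0 * (PySem.List.pyGet? arr j).getD 0
          ≤ (PySem.List.max? (PySem.List.slice arr (some i) (some (j + 1))) (fun x => x)).getD 0
      then count + 1 else count) count) 0

-- ===== PRECONDITION & SPEC =====
-- Python A indexes arr[i], arr[j] for 0 <= i < j < n: it raises IndexError iff n > len(arr)
-- (and n >= 2); Pre_ excludes exactly n > len(arr).
def Pre_array_pair (arr : List Int) (n : Int) : Prop := n ≤ arr.length
instance (arr : List Int) (n : Int) : Decidable (Pre_array_pair arr n) := by
  unfold Pre_array_pair; infer_instance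
def pvWitness_array_pair : List Int × Int := ([2, 1, 3], 3)
def Spec_array_pair (arr : List Int) (n : Int) (out : Int) : Prop := out = array_pair_alt arr n
instance (arr : List Int) (n : Int) (out : Int) : Decidable (Spec_array_pair arr n out) := by unfold Spec_array_pair; infer_instance

-- ===== CLAIM (what is proved, stated in full; the proofs are below) =====
def Claim_equal_array_pair : Prop := ∀ (arr : List Int) (n : Int), Dom_array_pair arr n → Pre_array_pair arr n → Spec_array_pair arr n (array_pair arr n)

-- ===== LEMMAS AND PROOFS =====

theorem pyGetD_toNat (arr : List Int) (j : Int) (h0 : 0 ≤ j) :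
    (PySem.List.pyGet? arr j).getD 0 = arr.getD j.toNat 0 :=
  PySem.List.pyGetD_of_nonneg arr 0 h0

theorem max_step (m a : Int) : (if a > m then a else m) = max m a := by
  by_cases h : a > m <;> simp [h] <;> omega

theorem slice_snoc (arr : List Int) (i j : Int) (h0 : 0 ≤ i) (hij : i ≤ j)
    (hj : j < (arr.length : Int)) :
    PySem.List.slice arr (some i) (some (j + 1)) =
      PySem.List.slice arr (some i) (some j) ++ [(PySem.List.pyGet? arr j).getD 0] := by
  have hj0 : 0 ≤ j := le_trans h0 hij
  rw [pyGetD_toNat arr j hj0, PySem.List.slice_toNat _ h0 (by omega),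
    PySem.List.slice_toNat _ h0 hj0]
  have h1 : (j + 1).toNat - i.toNat = (j.toNat - i.toNat) + 1 := by omega
  rw [h1, List.take_add_one]
  congr 1
  have hjl : j.toNat < arr.length := by omega
  have hidx : (List.drop i.toNat arr)[j.toNat - i.toNat]? = some arr[j.toNat] := by
    rw [List.getElem?_drop]
    have h2 : i.toNat + (j.toNat - i.toNat) = j.toNat := by omega
    rw [h2, List.getElem?_eq_getElem hjl]
  rw [hidx]
  simp [List.getD_eq_getElem?_getD, List.getElem?_eq_getElem hjl]

theorem max?_id_snoc (l : List Int) (m a : Int)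
    (h : PySem.List.max? l (fun y => y) = some m) :
    PySem.List.max? (l ++ [a]) (fun y => y) = some (max m a) := by
  cases l with
  | nil => simp [PySem.List.max?] at h
  | cons x t =>
    rw [PySem.List.max?_id_cons] at h
    rw [List.cons_append, PySem.List.max?_id_cons, List.foldl_append]
    simp at h
    simp [h]

theorem inner_eq (arr : List Int) (n i : Int) (hn : n ≤ (arr.length : Int)) (hi : 0 ≤ i) :
    ∀ (fuel : Nat) (j maxa count : Int), (n - j).toNat = fuel → i < j →
      PySem.List.max? (PySem.List.slice arr (some i) (some j)) (fun y => y) = some maxa →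
      apInner arr n ((PySem.List.pyGet? arr i).getD 0) j maxa count =
        (PySem.List.pyRange j n 1).foldl (fun c j' =>
          if (PySem.List.pyGet? arr i).getD 0 * (PySem.List.pyGet? arr j').getD 0
              ≤ (PySem.List.max? (PySem.List.slice arr (some i) (some (j' + 1))) (fun x => x)).getD 0
          then c + 1 else c) count := by
  intro fuel
  induction fuel with
  | zero =>
    intro j maxa count hf hij hmax
    have hnj : ¬ j < n := by omega
    rw [apInner, dif_neg hnj]
    have hr : PySem.List.pyRange j n 1 = [] := by
      rw [PySem.List.pyRange_one]
      have h0 : (n - j).toNat = 0 := hf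
      simp [h0]
    rw [hr]
    rfl
  | succ k ih =>
    intro j maxa count hf hij hmax
    have hjn : j < n := by omega
    have hjlen : j < (arr.length : Int) := lt_of_lt_of_le hjn hn
    have hmax' : PySem.List.max? (PySem.List.slice arr (some i) (some (j + 1)))
        (fun y => y) = some (max maxa ((PySem.List.pyGet? arr j).getD 0)) := by
      rw [slice_snoc arr i j hi (le_of_lt hij) hjlen]
      exact max?_id_snoc _ _ _ hmax
    rw [apInner, dif_pos hjn]
    simp only []
    rw [PySem.List.pyRange_one_cons hjn, List.foldl_cons]
    have hm : (if (PySem.List.pyGet? arr j).getD 0 > maxa then (PySem.List.pyGet? arr j).getD 0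
        else maxa) = max maxa ((PySem.List.pyGet? arr j).getD 0) := max_step _ _
    have hgd : (PySem.List.max? (PySem.List.slice arr (some i) (some (j + 1)))
        (fun x => x)).getD 0 = max maxa ((PySem.List.pyGet? arr j).getD 0) := by
      rw [hmax']
      rfl
    rw [hm, hgd]
    exact ih (j + 1) (max maxa ((PySem.List.pyGet? arr j).getD 0)) _ (by omega) (by omega) hmax'

theorem slice_single (arr : List Int) (i : Int) (h0 : 0 ≤ i) (hi : i < (arr.length : Int)) :
    PySem.List.slice arr (some i) (some (i + 1)) = [(PySem.List.pyGet? arr i).getD 0] := by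
  rw [slice_snoc arr i i h0 le_rfl hi, PySem.List.slice_toNat _ h0 h0]
  simp

theorem outer_eq (arr : List Int) (n : Int) (hn : n ≤ (arr.length : Int)) :
    ∀ (fuel : Nat) (i count : Int), (n - 1 - i).toNat = fuel → 0 ≤ i →
      apOuter arr n i count =
        (PySem.List.pyRange i (n - 1) 1).foldl (fun count i' =>
          (PySem.List.pyRange (i' + 1) n 1).foldl (fun count j =>
            if (PySem.List.pyGet? arr i').getD 0 * (PySem.List.pyGet? arr j).getD 0
                ≤ (PySem.List.max? (PySem.List.slice arr (some i') (some (j + 1))) (fun x => x)).getD 0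
            then count + 1 else count) count) count := by
  intro fuel
  induction fuel with
  | zero =>
    intro i count hf hi
    have hni : ¬ i < n - 1 := by omega
    rw [apOuter, dif_neg hni]
    have hr : PySem.List.pyRange i (n - 1) 1 = [] := by
      rw [PySem.List.pyRange_one]
      have h0 : (n - 1 - i).toNat = 0 := hf
      simp [h0]
    rw [hr]
    rfl
  | succ k ih =>
    intro i count hf hi
    have hin : i < n - 1 := by omega
    have hilen : i < (arr.length : Int) := by omega
    rw [apOuter, dif_pos hin]
    simp only []
    rw [PySem.List.pyRange_one_cons hin, List.foldl_cons]
    have hmax0 : PySem.List.max? (PySem.List.slice arr (some i) (some (i + 1)))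
        (fun y => y) = some ((PySem.List.pyGet? arr i).getD 0) := by
      rw [slice_single arr i hi hilen, PySem.List.max?_id_cons]
      simp
    rw [inner_eq arr n i hn hi (n - (i + 1)).toNat (i + 1)
      ((PySem.List.pyGet? arr i).getD 0) count rfl (by omega) hmax0]
    exact ih (i + 1) _ (by omega) (by omega)

-- ===== VERDICT (by name: the statement is the Claim_ definition above) =====
theorem array_pair_spec : Claim_equal_array_pair := by
  intro arr n _ hpre
  unfold Spec_array_pair
  show apOuter arr n 0 0 = _
  exact outer_eq arr n hpre (n - 1 - 0).toNat 0 0 rfl le_rfl
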